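-- pv_equiv track=rewrite | github.com/jasminelujia/pydelfi | compression/score/score.py | allocate_jobs
-- ===== SOURCE A (Python) =====
-- def allocate_jobs(rank, n_procs, n_jobs):
--     n_j_allocated = 0
--     for i in range(n_procs):
--         n_j_remain = n_jobs - n_j_allocated
--         n_p_remain = n_procs - i
--         n_j_to_allocate = int(n_j_remain / n_p_remain)
--         if rank == i:
--             return range(n_j_allocated, \
--                          n_j_allocated + n_j_to_allocate)
--         n_j_allocated += n_j_to_allocate
-- ===== SOURCE B (Python) =====
-- def allocate_jobs(rank, n_procs, n_jobs):
--     if not 0 <= rank < n_procs: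
--         raise ValueError("rank must satisfy 0 <= rank < n_procs")
--     # closed form: the first n_procs - r ranks get q jobs each, the last r get q + 1
--     q, r = divmod(n_jobs, n_procs)
--     cut = n_procs - r
--     start = rank * q + max(0, rank - cut)
--     stop = start + q + (1 if rank >= cut else 0)
--     return range(start, stop)
-- ===== Notes on version B (the rewrite author's own statement) =====
-- stated objective: alternative
-- what changed: B replaces A's loop that repeatedly re-divides the remaining jobs among the remaining processes by a single closed-form divmod: the first n_procs - (n_jobs % n_procs) ranks get n_jobs // n_procs jobs and the rest one more, giving this rank's range directly (O(1) arithmetic instead of a loop of rank divisions); B validates 0 <= rank < n_procs (where A silently returns None).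
-- outside the precondition, e.g. on allocate_jobs(3, 2, 10): A returns None, B raises ValueError; on allocate_jobs(-1, 2, 10): A returns None, B raises ValueError
import Mathlib
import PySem

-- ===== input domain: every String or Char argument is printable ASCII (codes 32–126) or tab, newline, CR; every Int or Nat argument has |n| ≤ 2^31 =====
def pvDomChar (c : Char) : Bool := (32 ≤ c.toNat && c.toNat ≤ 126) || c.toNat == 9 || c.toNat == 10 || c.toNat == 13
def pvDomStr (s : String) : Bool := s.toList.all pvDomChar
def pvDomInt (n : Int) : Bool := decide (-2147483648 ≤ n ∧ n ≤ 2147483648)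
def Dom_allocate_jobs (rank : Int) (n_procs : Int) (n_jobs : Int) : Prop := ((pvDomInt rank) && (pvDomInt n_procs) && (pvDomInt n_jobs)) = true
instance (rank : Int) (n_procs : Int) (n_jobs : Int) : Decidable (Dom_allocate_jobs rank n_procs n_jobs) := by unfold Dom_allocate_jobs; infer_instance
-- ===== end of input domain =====

-- B replaces A's per-rank loop (each step divides the remaining jobs among the remaining
-- processes) with one closed-form divmod giving this rank's range directly (a closed form instead of a loop).


-- ===== PORT A =====
-- A's for-loop over range(n_procs) with early return, as structural recursion over that range list;
-- Python's int(a / b) is float division truncated toward zero: on Dom (|ints| ≤ 2^31, so all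
-- operands stay far below 2^53, where the double quotient could first round across an integer)
-- this is exactly Int.tdiv, so the port uses Int.tdiv.
-- fuel = number of remaining loop iterations (totality guard only; n_procs.toNat suffices)
def allocate_jobs_go (rank : Int) (n_procs : Int) (n_jobs : Int) (i : Int) (n_j_allocated : Int) : Nat → List Int
  | 0 => []  -- loop falls off the end: Python returns None (excluded by Pre_)
  | fuel + 1 =>
    let n_j_remain := n_jobs - n_j_allocated
    let n_p_remain := n_procs - i
    let n_j_to_allocate := Int.tdiv n_j_remain n_p_remain
    if rank = i then PySem.List.pyRange n_j_allocated (n_j_allocated + n_j_to_allocate) 1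
    else allocate_jobs_go rank n_procs n_jobs (i + 1) (n_j_allocated + n_j_to_allocate) fuel

def allocate_jobs (rank : Int) (n_procs : Int) (n_jobs : Int) : List Int :=
  allocate_jobs_go rank n_procs n_jobs 0 0 n_procs.toNat

-- ===== PORT B =====
def allocate_jobs_alt (rank : Int) (n_procs : Int) (n_jobs : Int) : List Int :=
  let q := PySem.Int.floordiv n_jobs n_procs
  let r := PySem.Int.mod n_jobs n_procs
  let cut := n_procs - r
  let start := rank * q + max 0 (rank - cut)
  let stop := start + q + (if cut ≤ rank then 1 else 0)
  PySem.List.pyRange start stop 1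

-- ===== PRECONDITION & SPEC =====
-- Pre_: exactly the ranks A's loop reaches; outside it (rank not in range(n_procs)) Python A
-- falls off the loop and returns None, which is not a list-of-int value.
def Pre_allocate_jobs (rank : Int) (n_procs : Int) (n_jobs : Int) : Prop :=
  0 ≤ rank ∧ rank < n_procs

instance (rank : Int) (n_procs : Int) (n_jobs : Int) : Decidable (Pre_allocate_jobs rank n_procs n_jobs) := by unfold Pre_allocate_jobs; infer_instance

def pvWitness_allocate_jobs : Int × Int × Int := (2, 3, 10)

def Spec_allocate_jobs (rank : Int) (n_procs : Int) (n_jobs : Int) (out : List Int) : Prop := out = allocate_jobs_alt rank n_procs n_jobs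
instance (rank : Int) (n_procs : Int) (n_jobs : Int) (out : List Int) : Decidable (Spec_allocate_jobs rank n_procs n_jobs out) := by unfold Spec_allocate_jobs; infer_instance

-- ===== CLAIM (what is proved, stated in full; the proofs are below) =====
def Claim_equal_allocate_jobs : Prop := ∀ (rank : Int) (n_procs : Int) (n_jobs : Int), Dom_allocate_jobs rank n_procs n_jobs → Pre_allocate_jobs rank n_procs n_jobs → Spec_allocate_jobs rank n_procs n_jobs (allocate_jobs rank n_procs n_jobs)

-- ===== LEMMAS AND PROOFS =====

-- B's start value as a function of the rank (the loop invariant for A's accumulator)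
def pvF (n_procs : Int) (n_jobs : Int) (i : Int) : Int :=
  i * PySem.Int.floordiv n_jobs n_procs + max 0 (i - (n_procs - PySem.Int.mod n_jobs n_procs))

theorem pv_mod_bounds (p n : Int) (hp : 0 < p) :
    0 ≤ PySem.Int.mod n p ∧ PySem.Int.mod n p < p := by
  rw [PySem.Int.mod_eq_emod_of_pos (a := n) hp]
  exact ⟨Int.emod_nonneg n (by omega), Int.emod_lt_of_pos n hp⟩

-- B's stop value is pvF at rank+1 (pure algebra on max/ite; no sign assumption on n)
theorem pv_alt_eq (rank p n : Int) :
    allocate_jobs_alt rank p n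
      = PySem.List.pyRange (pvF p n rank) (pvF p n (rank + 1)) 1 := by
  unfold allocate_jobs_alt pvF
  set q := PySem.Int.floordiv n p
  set r := PySem.Int.mod n p
  have hstop : (rank + 1) * q + max 0 (rank + 1 - (p - r))
      = rank * q + max 0 (rank - (p - r)) + q + (if p - r ≤ rank then 1 else 0) := by
    by_cases h : p - r ≤ rank
    · rw [if_pos h, max_eq_right (by omega), max_eq_right (by omega)]; ring
    · rw [if_neg h, max_eq_left (by omega), max_eq_left (by omega)]; ring
  simp only [hstop]

-- the division A performs at step i equals B's closed-form increment (n ≥ 0)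
theorem pvF_step (p n i : Int) (h0 : 0 ≤ i) (hip : i < p) (hn : 0 ≤ n) :
    Int.tdiv (n - pvF p n i) (p - i) = pvF p n (i + 1) - pvF p n i := by
  have hppos : (0:Int) < p := by omega
  have hq := PySem.Int.floordiv_mul_add_mod n p
  obtain ⟨hr0, hrp⟩ := pv_mod_bounds p n hppos
  set q := PySem.Int.floordiv n p with hqdef
  set r := PySem.Int.mod n p with hrdef
  have hq0 : 0 ≤ q := by nlinarith [hq]
  unfold pvF
  rw [← hqdef, ← hrdef]
  by_cases hcut : i < p - r
  · -- before the cut: remainder = q*(p-i) + r with 0 ≤ r < p - i; A allocates q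
    rw [max_eq_left (by omega), max_eq_left (by omega)]
    have hval : n - (i * q + 0) = q * (p - i) + r := by nlinarith [hq]
    rw [hval, Int.tdiv_eq_ediv_of_nonneg (by nlinarith),
        show q * (p - i) + r = r + q * (p - i) by ring,
        Int.add_mul_ediv_right r q (by omega : p - i ≠ 0),
        Int.ediv_eq_zero_of_lt hr0 (by omega)]
    ring
  · -- at/after the cut: remainder = (q+1)*(p-i) exactly; A allocates q+1
    rw [max_eq_right (by omega), max_eq_right (by omega)]
    have hval : n - (i * q + (i - (p - r))) = (q + 1) * (p - i) := by nlinarith [hq]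
    rw [hval, Int.mul_tdiv_cancel _ (by omega : p - i ≠ 0)]
    ring

-- loop invariant: starting at index i with accumulator pvF i, A returns B's range (n ≥ 0)
theorem pv_go_eq (rank p n : Int) (hn : 0 ≤ n) (hr : 0 ≤ rank) (hrp : rank < p) :
    ∀ (k : Nat) (i : Int), 0 ≤ i → i ≤ rank → rank - i < (k : Int) →
      allocate_jobs_go rank p n i (pvF p n i) k
        = PySem.List.pyRange (pvF p n rank) (pvF p n (rank + 1)) 1 := by
  intro k
  induction k with
  | zero => intro i h0 h1 h2; omega
  | succ k ih =>
    intro i h0 h1 h2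
    have hip : i < p := lt_of_le_of_lt h1 hrp
    unfold allocate_jobs_go
    simp only
    rw [pvF_step p n i h0 hip hn]
    by_cases hri : rank = i
    · simp [hri]
    · simp only [if_neg hri]
      rw [show pvF p n i + (pvF p n (i+1) - pvF p n i) = pvF p n (i+1) by ring]
      exact ih (i+1) (by omega) (by omega) (by omega)

-- n < 0: every per-step allocation A computes is ≤ 0, so A's returned range is empty
theorem pv_go_neg (rank p n : Int) (hn : n < 0) (hrp : rank < p) :
    ∀ (k : Nat) (i acc : Int), 0 ≤ i → n ≤ acc → i + (k : Int) ≤ p →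
      allocate_jobs_go rank p n i acc k = [] := by
  intro k
  induction k with
  | zero =>
    intro i acc h0 h2 h3
    unfold allocate_jobs_go; rfl
  | succ k ih =>
    intro i acc h0 hacc h3
    have hip : i < p := by omega
    · unfold allocate_jobs_go
      simp only
      have ht : Int.tdiv (n - acc) (p - i) ≤ 0 := by
        have : (0:Int) ≤ acc - n := by omega
        calc Int.tdiv (n - acc) (p - i) = -Int.tdiv (acc - n) (p - i) := by
              rw [show n - acc = -(acc - n) by ring, Int.neg_tdiv]
          _ ≤ 0 := by
              have := Int.tdiv_nonneg this (by omega : (0:Int) ≤ p - i)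
              omega
      by_cases hri : rank = i
      · simp only [if_pos hri]
        exact PySem.List.pyRange_one_eq_nil (by omega)
      · simp only [if_neg hri]
        have hge : n - acc ≤ Int.tdiv (n - acc) (p - i) := by
          have h1 : Int.tdiv (acc - n) (p - i) ≤ acc - n :=
            Int.tdiv_le_self (p - i) (by omega)
          rw [show n - acc = -(acc - n) by ring, Int.neg_tdiv]
          omega
        exact ih (i+1) _ (by omega) (by omega) (by push_cast; omega)

theorem pvF_zero (p n : Int) (hp : 0 < p) : pvF p n 0 = 0 := by
  obtain ⟨_, hrp⟩ := pv_mod_bounds p n hp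
  unfold pvF
  rw [max_eq_left (by omega)]; ring

-- ===== VERDICT (by name: the statement is the Claim_ definition above) =====
theorem allocate_jobs_spec : Claim_equal_allocate_jobs := by
  intro rank p n _ hpre
  obtain ⟨hr, hrp⟩ := hpre
  have hppos : (0:Int) < p := lt_of_le_of_lt hr hrp
  unfold Spec_allocate_jobs allocate_jobs
  rw [pv_alt_eq]
  by_cases hn : 0 ≤ n
  · have h0 := pv_go_eq rank p n hn hr hrp p.toNat 0 le_rfl hr (by omega)
    rw [pvF_zero p n hppos] at h0
    exact h0
  · rw [pv_go_neg rank p n (by omega) hrp p.toNat 0 0 le_rfl (by omega) (by omega)]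
    obtain ⟨hr0, hrpp⟩ := pv_mod_bounds p n hppos
    have hq := PySem.Int.floordiv_mul_add_mod n p
    have hqneg : PySem.Int.floordiv n p < 0 := by nlinarith [hq]
    refine (PySem.List.pyRange_one_eq_nil ?_).symm
    unfold pvF
    set q := PySem.Int.floordiv n p
    set r := PySem.Int.mod n p
    by_cases h : p - r ≤ rank
    · rw [max_eq_right (by omega), max_eq_right (by omega)]; nlinarith
    · rw [max_eq_left (by omega), max_eq_left (by omega)]; nlinarith
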